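-- pv_equiv track=rewrite | github.com/Fogapod/potato_bot | pink/utils.py | minutes_to_human_readable
-- ===== SOURCE A (Python) =====
-- def minutes_to_human_readable(minutes: int) -> str:
--     ranges = (
--         (60, "m"),  # minutes/hour
--         (24, "h"),  # hours/day
--         (30, "d"),  # days/month
--         (12, "mon"),  # months/year
--         (1, "y"),  # stop at years
--     )
--
--     s = ""
--     quotient = minutes
--
--     for count, name in ranges:
--         quotient, remainder = divmod(quotient, count)
--
--         if count == 1:
--             remainder = quotient  # terminating value
--
--         if remainder:
--             s = f"{remainder}{name} {s}"
--
--         if not quotient: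
--             break
--
--     return s.rstrip()
-- ===== SOURCE B (Python) =====
-- THRESHOLDS = (
--     (518400, 0, "y"),    # minutes per year (60*24*30*12); years unbounded
--     (43200, 12, "mon"),  # minutes per month
--     (1440, 30, "d"),     # minutes per day
--     (60, 24, "h"),       # minutes per hour
--     (1, 60, "m"),
-- )
--
--
-- def minutes_to_human_readable(minutes: int) -> str:
--     # Each component is computed independently from `minutes` via its
--     # cumulative threshold: (minutes // threshold) % cap (years uncapped).
--     parts = []
--     for threshold, cap, name in THRESHOLDS:
--         v = minutes // threshold
--         if cap:
--             v %= cap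
--         if v:
--             parts.append(f"{v}{name}")
--     return " ".join(parts)
-- ===== Notes on version B (the rewrite author's own statement) =====
-- stated objective: simpler
-- what changed: Replaces A's stateful divmod loop with early break, in-loop string prepend and final rstrip by computing each unit independently from minutes via cumulative thresholds ((minutes // 518400), (minutes // 43200) % 12, ..., minutes % 60) and joining the nonzero components.
import Mathlib
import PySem

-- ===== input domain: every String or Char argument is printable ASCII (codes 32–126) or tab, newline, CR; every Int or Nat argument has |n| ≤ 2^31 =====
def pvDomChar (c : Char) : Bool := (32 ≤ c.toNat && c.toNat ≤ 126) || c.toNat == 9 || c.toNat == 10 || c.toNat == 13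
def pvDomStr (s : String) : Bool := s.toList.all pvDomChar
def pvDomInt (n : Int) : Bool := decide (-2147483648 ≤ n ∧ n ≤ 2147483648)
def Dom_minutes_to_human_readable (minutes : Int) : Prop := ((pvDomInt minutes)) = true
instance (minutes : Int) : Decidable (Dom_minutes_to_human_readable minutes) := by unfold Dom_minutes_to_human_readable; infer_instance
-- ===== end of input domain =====

-- B replaces A's stateful break-early divmod loop (prepend each unit, rstrip at the end) by computing
-- every component independently from `minutes` via its cumulative threshold ((minutes//T) % cap) and
-- joining the nonzero ones (objective: simpler).

-- ===== PORT A =====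
-- the 'for count, name in ranges' loop of A, with its early 'break' ('if not quotient')
def mthrLoop : List (Int × String) → String → Int → String
  | [], s, _ => s
  | (count, name) :: rest, s, q =>
    let quotient := PySem.Int.floordiv q count
    let remainder := PySem.Int.mod q count
    let remainder := if count = 1 then quotient else remainder
    let s' := if remainder ≠ 0 then PySem.Int.toStr remainder ++ name ++ " " ++ s else s
    if quotient = 0 then s' else mthrLoop rest s' quotient

def minutes_to_human_readable (minutes : Int) : String :=
  let ranges : List (Int × String) := [(60, "m"), (24, "h"), (30, "d"), (12, "mon"), (1, "y")]
  PySem.Str.rstrip (mthrLoop ranges "" minutes)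

-- ===== PORT B =====
-- Source B's module constant THRESHOLDS: (threshold, cap, name); cap 0 encodes Python's falsy cap (years uncapped)
def mthrThresholds : List (Int × Int × String) :=
  [(518400, 0, "y"), (43200, 12, "mon"), (1440, 30, "d"), (60, 24, "h"), (1, 60, "m")]

-- Source B's loop body: v = minutes // threshold, reduced % cap when cap is nonzero
def mthrValue (minutes : Int) (tcn : Int × Int × String) : Int :=
  if tcn.2.1 ≠ 0 then PySem.Int.mod (PySem.Int.floordiv minutes tcn.1) tcn.2.1
  else PySem.Int.floordiv minutes tcn.1

-- Source B's loop: each component computed independently from minutes; append "<v><name>" if nonzero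
def minutes_to_human_readable_alt (minutes : Int) : String :=
  PySem.Str.join " " (mthrThresholds.foldl
    (fun parts tcn =>
      if mthrValue minutes tcn ≠ 0 then parts ++ [PySem.Int.toStr (mthrValue minutes tcn) ++ tcn.2.2]
      else parts) [])

-- ===== PRECONDITION & SPEC =====
def Spec_minutes_to_human_readable (minutes : Int) (out : String) : Prop := out = minutes_to_human_readable_alt minutes
instance (minutes : Int) (out : String) : Decidable (Spec_minutes_to_human_readable minutes out) := by unfold Spec_minutes_to_human_readable; infer_instance

-- ===== CLAIM (what is proved, stated in full; the proofs are below) =====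
def Claim_equal_minutes_to_human_readable : Prop := ∀ (minutes : Int), Dom_minutes_to_human_readable minutes → Spec_minutes_to_human_readable minutes (minutes_to_human_readable minutes)

-- ===== LEMMAS AND PROOFS =====

-- proof-local chained form of the five components (helper for relating the two ports)
def mthrChain (a : Int) : String :=
  PySem.Str.join " "
    ((([(PySem.Int.floordiv (PySem.Int.floordiv (PySem.Int.floordiv (PySem.Int.floordiv a 60) 24) 30) 12, "y"),
        (PySem.Int.mod (PySem.Int.floordiv (PySem.Int.floordiv (PySem.Int.floordiv a 60) 24) 30) 12, "mon"),
        (PySem.Int.mod (PySem.Int.floordiv (PySem.Int.floordiv a 60) 24) 30, "d"),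
        (PySem.Int.mod (PySem.Int.floordiv a 60) 24, "h"),
        (PySem.Int.mod a 60, "m")] : List (Int × String)).filter (fun p => p.1 ≠ 0)).map
      (fun p => PySem.Int.toStr p.1 ++ p.2))

lemma foldl_append_ite {α β : Type} (p : α → Prop) [DecidablePred p] (f : α → β) (l : List α) (acc : List β) :
    l.foldl (fun acc x => if p x then acc ++ [f x] else acc) acc
      = acc ++ (l.filter (fun x => decide (p x))).map f := by
  induction l generalizing acc with
  | nil => simp
  | cons x xs ih => simp only [List.foldl, List.filter_cons]; split_ifs <;> simp_all [ih]

lemma alt_eq_chain (a : Int) : minutes_to_human_readable_alt a = mthrChain a := by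
  unfold minutes_to_human_readable_alt mthrChain
  rw [foldl_append_ite (fun tcn => mthrValue a tcn ≠ 0)
        (fun tcn => PySem.Int.toStr (mthrValue a tcn) ++ tcn.2.2)]
  have hu : mthrThresholds.map (fun tcn => (mthrValue a tcn, tcn.2.2))
      = [(PySem.Int.floordiv (PySem.Int.floordiv (PySem.Int.floordiv (PySem.Int.floordiv a 60) 24) 30) 12, "y"),
         (PySem.Int.mod (PySem.Int.floordiv (PySem.Int.floordiv (PySem.Int.floordiv a 60) 24) 30) 12, "mon"),
         (PySem.Int.mod (PySem.Int.floordiv (PySem.Int.floordiv a 60) 24) 30, "d"),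
         (PySem.Int.mod (PySem.Int.floordiv a 60) 24, "h"),
         (PySem.Int.mod a 60, "m")] := by
    simp only [mthrThresholds, mthrValue, List.map_cons, List.map_nil,
      List.cons.injEq, Prod.mk.injEq,
      PySem.Int.floordiv_eq_ediv_of_pos (show (0:Int) < 518400 by norm_num),
      PySem.Int.floordiv_eq_ediv_of_pos (show (0:Int) < 43200 by norm_num),
      PySem.Int.floordiv_eq_ediv_of_pos (show (0:Int) < 1440 by norm_num),
      PySem.Int.floordiv_eq_ediv_of_pos (show (0:Int) < 60 by norm_num),
      PySem.Int.floordiv_eq_ediv_of_pos (show (0:Int) < 24 by norm_num),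
      PySem.Int.floordiv_eq_ediv_of_pos (show (0:Int) < 30 by norm_num),
      PySem.Int.floordiv_eq_ediv_of_pos (show (0:Int) < 12 by norm_num),
      PySem.Int.floordiv_eq_ediv_of_pos (show (0:Int) < 1 by norm_num),
      PySem.Int.mod_eq_emod_of_pos (show (0:Int) < 60 by norm_num),
      PySem.Int.mod_eq_emod_of_pos (show (0:Int) < 24 by norm_num),
      PySem.Int.mod_eq_emod_of_pos (show (0:Int) < 30 by norm_num),
      PySem.Int.mod_eq_emod_of_pos (show (0:Int) < 12 by norm_num)]
    norm_num
    omega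
  rw [← hu, List.filter_map, List.map_map]
  simp only [List.nil_append, Function.comp_def]

-- A's loop output before rstrip: each emitted unit followed by one space
def spChain : List String → String
  | [] => ""
  | [p] => p ++ " "
  | p :: rest => p ++ " " ++ spChain rest

lemma rstrip_append_of_ne (x t : List Char) (h : PySem.Chars.rstrip t ≠ []) :
    PySem.Chars.rstrip (x ++ t) = x ++ PySem.Chars.rstrip t := by
  unfold PySem.Chars.rstrip at *
  rw [List.reverse_append, List.dropWhile_append]
  have hne : ¬ (t.reverse.dropWhile PySem.Chars.isspace).isEmpty = true := by
    intro he
    simp [List.isEmpty_iff.mp he] at h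
  simp [hne]

lemma keyChars : ∀ (parts : List (List Char)),
    (∀ p ∈ parts, ∃ x c, p = x ++ [c] ∧ PySem.Chars.isspace c = false) →
    PySem.Chars.rstrip (parts.foldr (fun p acc => p ++ [' '] ++ acc) []) =
      PySem.Chars.join [' '] parts := by
  intro parts
  induction parts with
  | nil => intro _; decide
  | cons p rest ih =>
    intro h
    obtain ⟨x, c, hp, hc⟩ := h p (by simp)
    match rest with
    | [] =>
      simp only [List.foldr, PySem.Chars.join_singleton, List.append_nil]
      subst hp
      simp [PySem.Chars.rstrip, List.dropWhile, hc, show PySem.Chars.isspace ' ' = true from by decide]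
    | q :: rs =>
      have hrest := ih (fun p hp => h p (by simp [hp]))
      obtain ⟨xq, cq, hq, hcq⟩ := h q (by simp)
      have hne : PySem.Chars.rstrip ((q :: rs).foldr (fun p acc => p ++ [' '] ++ acc) []) ≠ [] := by
        rw [hrest]
        match rs with
        | [] => simp [PySem.Chars.join_singleton, hq]
        | r :: rs' => simp [PySem.Chars.join_cons_cons, hq]
      rw [PySem.Chars.join_cons_cons]
      show PySem.Chars.rstrip ((p ++ [' ']) ++ (q :: rs).foldr (fun p acc => p ++ [' '] ++ acc) []) = _
      rw [rstrip_append_of_ne _ _ hne, hrest]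

lemma foldr_toList (parts : List String) :
    (parts.foldr (fun p acc => p ++ " " ++ acc) "").toList
      = (parts.map String.toList).foldr (fun p acc => p ++ [' '] ++ acc) [] := by
  induction parts with
  | nil => rfl
  | cons p rest ih => simp [List.foldr, ih]

lemma keyStr (parts : List String)
    (h : ∀ p ∈ parts, ∃ x c, p.toList = x ++ [c] ∧ PySem.Chars.isspace c = false) :
    PySem.Str.rstrip (parts.foldr (fun p acc => p ++ " " ++ acc) "") = PySem.Str.join " " parts := by
  apply String.toList_inj.mp
  rw [PySem.Str.toList_rstrip, PySem.Str.toList_join]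
  rw [foldr_toList, show (" ".toList) = [' '] from by decide]
  exact keyChars _ (by
    intro p hp
    obtain ⟨q, hq, rfl⟩ := List.mem_map.mp hp
    exact h q hq)

lemma spChain_eq_foldr (parts : List String) :
    spChain parts = parts.foldr (fun p acc => p ++ " " ++ acc) "" := by
  induction parts with
  | nil => rfl
  | cons p rest ih =>
    match rest with
    | [] => simp [spChain]
    | q :: rs =>
      rw [show spChain (p :: q :: rs) = p ++ " " ++ spChain (q :: rs) from rfl, ih]
      rfl

lemma keyStr' (parts : List String)
    (h : ∀ p ∈ parts, ∃ x c, p.toList = x ++ [c] ∧ PySem.Chars.isspace c = false) :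
    PySem.Str.rstrip (spChain parts) = PySem.Str.join " " parts := by
  rw [spChain_eq_foldr]; exact keyStr parts h

lemma part_ok (v : Int) (name : String) (x0 : List Char) (c : Char)
    (hn : name.toList = x0 ++ [c]) (hc : PySem.Chars.isspace c = false) :
    ∃ x c', (PySem.Int.toStr v ++ name).toList = x ++ [c'] ∧ PySem.Chars.isspace c' = false := by
  refine ⟨(PySem.Int.toStr v).toList ++ x0, c, ?_, hc⟩
  simp [hn]

lemma ok_y (v : Int) : ∃ x c, (PySem.Int.toStr v ++ "y").toList = x ++ [c] ∧ PySem.Chars.isspace c = false :=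
  part_ok v "y" [] 'y' (by decide) (by decide)
lemma ok_mon (v : Int) : ∃ x c, (PySem.Int.toStr v ++ "mon").toList = x ++ [c] ∧ PySem.Chars.isspace c = false :=
  part_ok v "mon" ['m','o'] 'n' (by decide) (by decide)
lemma ok_d (v : Int) : ∃ x c, (PySem.Int.toStr v ++ "d").toList = x ++ [c] ∧ PySem.Chars.isspace c = false :=
  part_ok v "d" [] 'd' (by decide) (by decide)
lemma ok_h (v : Int) : ∃ x c, (PySem.Int.toStr v ++ "h").toList = x ++ [c] ∧ PySem.Chars.isspace c = false :=
  part_ok v "h" [] 'h' (by decide) (by decide)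
lemma ok_m (v : Int) : ∃ x c, (PySem.Int.toStr v ++ "m").toList = x ++ [c] ∧ PySem.Chars.isspace c = false :=
  part_ok v "m" [] 'm' (by decide) (by decide)

set_option maxHeartbeats 1000000 in
lemma main_eq (a : Int) : minutes_to_human_readable a = mthrChain a := by
  unfold minutes_to_human_readable mthrChain
  simp only [mthrLoop]
  norm_num
  by_cases h1 : a / 60 = 0
  · by_cases hm : (60:Int) ∣ a
    · simp [h1, hm]
      rfl
    · simp [h1, hm]
      have hok : ∀ p ∈ [PySem.Int.toStr (a % 60) ++ "m"],
          ∃ x c, p.toList = x ++ [c] ∧ PySem.Chars.isspace c = false := by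
        intro p hp
        simp only [List.mem_cons, List.not_mem_nil, or_false] at hp
        subst hp
        exact ok_m _
      exact keyStr' [PySem.Int.toStr (a % 60) ++ "m"] hok
  · by_cases h2 : a / 60 / 24 = 0
    · have hh : ¬ (24:Int) ∣ a / 60 := by omega
      by_cases hm : (60:Int) ∣ a
      · simp [h1, h2, hh, hm]
        have hok : ∀ p ∈ [PySem.Int.toStr (a / 60 % 24) ++ "h"],
            ∃ x c, p.toList = x ++ [c] ∧ PySem.Chars.isspace c = false := by
          intro p hp
          simp only [List.mem_cons, List.not_mem_nil, or_false] at hp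
          subst hp
          exact ok_h _
        exact keyStr' [PySem.Int.toStr (a / 60 % 24) ++ "h"] hok
      · simp [h1, h2, hh, hm]
        have hok : ∀ p ∈ [PySem.Int.toStr (a / 60 % 24) ++ "h", PySem.Int.toStr (a % 60) ++ "m"],
            ∃ x c, p.toList = x ++ [c] ∧ PySem.Chars.isspace c = false := by
          intro p hp
          simp only [List.mem_cons, List.not_mem_nil, or_false] at hp
          rcases hp with rfl | rfl
          · exact ok_h _
          · exact ok_m _
        exact keyStr' [PySem.Int.toStr (a / 60 % 24) ++ "h", PySem.Int.toStr (a % 60) ++ "m"] hok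
    · by_cases h3 : a / 60 / 24 / 30 = 0
      · have hd : ¬ (30:Int) ∣ a / 60 / 24 := by omega
        by_cases hh : (24:Int) ∣ a / 60
        · by_cases hm : (60:Int) ∣ a
          · simp [h1, h2, h3, hd, hh, hm]
            have hok : ∀ p ∈ [PySem.Int.toStr (a / 60 / 24 % 30) ++ "d"],
                ∃ x c, p.toList = x ++ [c] ∧ PySem.Chars.isspace c = false := by
              intro p hp
              simp only [List.mem_cons, List.not_mem_nil, or_false] at hp
              subst hp
              exact ok_d _
            exact keyStr' [PySem.Int.toStr (a / 60 / 24 % 30) ++ "d"] hok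
          · simp [h1, h2, h3, hd, hh, hm]
            have hok : ∀ p ∈ [PySem.Int.toStr (a / 60 / 24 % 30) ++ "d", PySem.Int.toStr (a % 60) ++ "m"],
                ∃ x c, p.toList = x ++ [c] ∧ PySem.Chars.isspace c = false := by
              intro p hp
              simp only [List.mem_cons, List.not_mem_nil, or_false] at hp
              rcases hp with rfl | rfl
              · exact ok_d _
              · exact ok_m _
            exact keyStr' [PySem.Int.toStr (a / 60 / 24 % 30) ++ "d", PySem.Int.toStr (a % 60) ++ "m"] hok
        · by_cases hm : (60:Int) ∣ a
          · simp [h1, h2, h3, hd, hh, hm]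
            have hok : ∀ p ∈ [PySem.Int.toStr (a / 60 / 24 % 30) ++ "d", PySem.Int.toStr (a / 60 % 24) ++ "h"],
                ∃ x c, p.toList = x ++ [c] ∧ PySem.Chars.isspace c = false := by
              intro p hp
              simp only [List.mem_cons, List.not_mem_nil, or_false] at hp
              rcases hp with rfl | rfl
              · exact ok_d _
              · exact ok_h _
            exact keyStr' [PySem.Int.toStr (a / 60 / 24 % 30) ++ "d", PySem.Int.toStr (a / 60 % 24) ++ "h"] hok
          · simp [h1, h2, h3, hd, hh, hm]
            have hok : ∀ p ∈ [PySem.Int.toStr (a / 60 / 24 % 30) ++ "d", PySem.Int.toStr (a / 60 % 24) ++ "h", PySem.Int.toStr (a % 60) ++ "m"],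
                ∃ x c, p.toList = x ++ [c] ∧ PySem.Chars.isspace c = false := by
              intro p hp
              simp only [List.mem_cons, List.not_mem_nil, or_false] at hp
              rcases hp with rfl | rfl | rfl
              · exact ok_d _
              · exact ok_h _
              · exact ok_m _
            exact keyStr' [PySem.Int.toStr (a / 60 / 24 % 30) ++ "d", PySem.Int.toStr (a / 60 % 24) ++ "h", PySem.Int.toStr (a % 60) ++ "m"] hok
      · by_cases h4 : a / 60 / 24 / 30 / 12 = 0
        · have hmon : ¬ (12:Int) ∣ a / 60 / 24 / 30 := by omega
          by_cases hd : (30:Int) ∣ a / 60 / 24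
          · by_cases hh : (24:Int) ∣ a / 60
            · by_cases hm : (60:Int) ∣ a
              · simp [h1, h2, h3, h4, hmon, hd, hh, hm]
                have hok : ∀ p ∈ [PySem.Int.toStr (a / 60 / 24 / 30 % 12) ++ "mon"],
                    ∃ x c, p.toList = x ++ [c] ∧ PySem.Chars.isspace c = false := by
                  intro p hp
                  simp only [List.mem_cons, List.not_mem_nil, or_false] at hp
                  subst hp
                  exact ok_mon _
                exact keyStr' [PySem.Int.toStr (a / 60 / 24 / 30 % 12) ++ "mon"] hok
              · simp [h1, h2, h3, h4, hmon, hd, hh, hm]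
                have hok : ∀ p ∈ [PySem.Int.toStr (a / 60 / 24 / 30 % 12) ++ "mon", PySem.Int.toStr (a % 60) ++ "m"],
                    ∃ x c, p.toList = x ++ [c] ∧ PySem.Chars.isspace c = false := by
                  intro p hp
                  simp only [List.mem_cons, List.not_mem_nil, or_false] at hp
                  rcases hp with rfl | rfl
                  · exact ok_mon _
                  · exact ok_m _
                exact keyStr' [PySem.Int.toStr (a / 60 / 24 / 30 % 12) ++ "mon", PySem.Int.toStr (a % 60) ++ "m"] hok
            · by_cases hm : (60:Int) ∣ a
              · simp [h1, h2, h3, h4, hmon, hd, hh, hm]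
                have hok : ∀ p ∈ [PySem.Int.toStr (a / 60 / 24 / 30 % 12) ++ "mon", PySem.Int.toStr (a / 60 % 24) ++ "h"],
                    ∃ x c, p.toList = x ++ [c] ∧ PySem.Chars.isspace c = false := by
                  intro p hp
                  simp only [List.mem_cons, List.not_mem_nil, or_false] at hp
                  rcases hp with rfl | rfl
                  · exact ok_mon _
                  · exact ok_h _
                exact keyStr' [PySem.Int.toStr (a / 60 / 24 / 30 % 12) ++ "mon", PySem.Int.toStr (a / 60 % 24) ++ "h"] hok
              · simp [h1, h2, h3, h4, hmon, hd, hh, hm]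
                have hok : ∀ p ∈ [PySem.Int.toStr (a / 60 / 24 / 30 % 12) ++ "mon", PySem.Int.toStr (a / 60 % 24) ++ "h", PySem.Int.toStr (a % 60) ++ "m"],
                    ∃ x c, p.toList = x ++ [c] ∧ PySem.Chars.isspace c = false := by
                  intro p hp
                  simp only [List.mem_cons, List.not_mem_nil, or_false] at hp
                  rcases hp with rfl | rfl | rfl
                  · exact ok_mon _
                  · exact ok_h _
                  · exact ok_m _
                exact keyStr' [PySem.Int.toStr (a / 60 / 24 / 30 % 12) ++ "mon", PySem.Int.toStr (a / 60 % 24) ++ "h", PySem.Int.toStr (a % 60) ++ "m"] hok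
          · by_cases hh : (24:Int) ∣ a / 60
            · by_cases hm : (60:Int) ∣ a
              · simp [h1, h2, h3, h4, hmon, hd, hh, hm]
                have hok : ∀ p ∈ [PySem.Int.toStr (a / 60 / 24 / 30 % 12) ++ "mon", PySem.Int.toStr (a / 60 / 24 % 30) ++ "d"],
                    ∃ x c, p.toList = x ++ [c] ∧ PySem.Chars.isspace c = false := by
                  intro p hp
                  simp only [List.mem_cons, List.not_mem_nil, or_false] at hp
                  rcases hp with rfl | rfl
                  · exact ok_mon _
                  · exact ok_d _
                exact keyStr' [PySem.Int.toStr (a / 60 / 24 / 30 % 12) ++ "mon", PySem.Int.toStr (a / 60 / 24 % 30) ++ "d"] hok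
              · simp [h1, h2, h3, h4, hmon, hd, hh, hm]
                have hok : ∀ p ∈ [PySem.Int.toStr (a / 60 / 24 / 30 % 12) ++ "mon", PySem.Int.toStr (a / 60 / 24 % 30) ++ "d", PySem.Int.toStr (a % 60) ++ "m"],
                    ∃ x c, p.toList = x ++ [c] ∧ PySem.Chars.isspace c = false := by
                  intro p hp
                  simp only [List.mem_cons, List.not_mem_nil, or_false] at hp
                  rcases hp with rfl | rfl | rfl
                  · exact ok_mon _
                  · exact ok_d _
                  · exact ok_m _
                exact keyStr' [PySem.Int.toStr (a / 60 / 24 / 30 % 12) ++ "mon", PySem.Int.toStr (a / 60 / 24 % 30) ++ "d", PySem.Int.toStr (a % 60) ++ "m"] hok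
            · by_cases hm : (60:Int) ∣ a
              · simp [h1, h2, h3, h4, hmon, hd, hh, hm]
                have hok : ∀ p ∈ [PySem.Int.toStr (a / 60 / 24 / 30 % 12) ++ "mon", PySem.Int.toStr (a / 60 / 24 % 30) ++ "d", PySem.Int.toStr (a / 60 % 24) ++ "h"],
                    ∃ x c, p.toList = x ++ [c] ∧ PySem.Chars.isspace c = false := by
                  intro p hp
                  simp only [List.mem_cons, List.not_mem_nil, or_false] at hp
                  rcases hp with rfl | rfl | rfl
                  · exact ok_mon _
                  · exact ok_d _
                  · exact ok_h _
                exact keyStr' [PySem.Int.toStr (a / 60 / 24 / 30 % 12) ++ "mon", PySem.Int.toStr (a / 60 / 24 % 30) ++ "d", PySem.Int.toStr (a / 60 % 24) ++ "h"] hok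
              · simp [h1, h2, h3, h4, hmon, hd, hh, hm]
                have hok : ∀ p ∈ [PySem.Int.toStr (a / 60 / 24 / 30 % 12) ++ "mon", PySem.Int.toStr (a / 60 / 24 % 30) ++ "d", PySem.Int.toStr (a / 60 % 24) ++ "h", PySem.Int.toStr (a % 60) ++ "m"],
                    ∃ x c, p.toList = x ++ [c] ∧ PySem.Chars.isspace c = false := by
                  intro p hp
                  simp only [List.mem_cons, List.not_mem_nil, or_false] at hp
                  rcases hp with rfl | rfl | rfl | rfl
                  · exact ok_mon _
                  · exact ok_d _
                  · exact ok_h _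
                  · exact ok_m _
                exact keyStr' [PySem.Int.toStr (a / 60 / 24 / 30 % 12) ++ "mon", PySem.Int.toStr (a / 60 / 24 % 30) ++ "d", PySem.Int.toStr (a / 60 % 24) ++ "h", PySem.Int.toStr (a % 60) ++ "m"] hok
        · by_cases hmon : (12:Int) ∣ a / 60 / 24 / 30
          · by_cases hd : (30:Int) ∣ a / 60 / 24
            · by_cases hh : (24:Int) ∣ a / 60
              · by_cases hm : (60:Int) ∣ a
                · simp [h1, h2, h3, h4, hmon, hd, hh, hm]
                  have hok : ∀ p ∈ [PySem.Int.toStr (a / 60 / 24 / 30 / 12) ++ "y"],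
                      ∃ x c, p.toList = x ++ [c] ∧ PySem.Chars.isspace c = false := by
                    intro p hp
                    simp only [List.mem_cons, List.not_mem_nil, or_false] at hp
                    subst hp
                    exact ok_y _
                  exact keyStr' [PySem.Int.toStr (a / 60 / 24 / 30 / 12) ++ "y"] hok
                · simp [h1, h2, h3, h4, hmon, hd, hh, hm]
                  have hok : ∀ p ∈ [PySem.Int.toStr (a / 60 / 24 / 30 / 12) ++ "y", PySem.Int.toStr (a % 60) ++ "m"],
                      ∃ x c, p.toList = x ++ [c] ∧ PySem.Chars.isspace c = false := by
                    intro p hp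
                    simp only [List.mem_cons, List.not_mem_nil, or_false] at hp
                    rcases hp with rfl | rfl
                    · exact ok_y _
                    · exact ok_m _
                  exact keyStr' [PySem.Int.toStr (a / 60 / 24 / 30 / 12) ++ "y", PySem.Int.toStr (a % 60) ++ "m"] hok
              · by_cases hm : (60:Int) ∣ a
                · simp [h1, h2, h3, h4, hmon, hd, hh, hm]
                  have hok : ∀ p ∈ [PySem.Int.toStr (a / 60 / 24 / 30 / 12) ++ "y", PySem.Int.toStr (a / 60 % 24) ++ "h"],
                      ∃ x c, p.toList = x ++ [c] ∧ PySem.Chars.isspace c = false := by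
                    intro p hp
                    simp only [List.mem_cons, List.not_mem_nil, or_false] at hp
                    rcases hp with rfl | rfl
                    · exact ok_y _
                    · exact ok_h _
                  exact keyStr' [PySem.Int.toStr (a / 60 / 24 / 30 / 12) ++ "y", PySem.Int.toStr (a / 60 % 24) ++ "h"] hok
                · simp [h1, h2, h3, h4, hmon, hd, hh, hm]
                  have hok : ∀ p ∈ [PySem.Int.toStr (a / 60 / 24 / 30 / 12) ++ "y", PySem.Int.toStr (a / 60 % 24) ++ "h", PySem.Int.toStr (a % 60) ++ "m"],
                      ∃ x c, p.toList = x ++ [c] ∧ PySem.Chars.isspace c = false := by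
                    intro p hp
                    simp only [List.mem_cons, List.not_mem_nil, or_false] at hp
                    rcases hp with rfl | rfl | rfl
                    · exact ok_y _
                    · exact ok_h _
                    · exact ok_m _
                  exact keyStr' [PySem.Int.toStr (a / 60 / 24 / 30 / 12) ++ "y", PySem.Int.toStr (a / 60 % 24) ++ "h", PySem.Int.toStr (a % 60) ++ "m"] hok
            · by_cases hh : (24:Int) ∣ a / 60
              · by_cases hm : (60:Int) ∣ a
                · simp [h1, h2, h3, h4, hmon, hd, hh, hm]
                  have hok : ∀ p ∈ [PySem.Int.toStr (a / 60 / 24 / 30 / 12) ++ "y", PySem.Int.toStr (a / 60 / 24 % 30) ++ "d"],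
                      ∃ x c, p.toList = x ++ [c] ∧ PySem.Chars.isspace c = false := by
                    intro p hp
                    simp only [List.mem_cons, List.not_mem_nil, or_false] at hp
                    rcases hp with rfl | rfl
                    · exact ok_y _
                    · exact ok_d _
                  exact keyStr' [PySem.Int.toStr (a / 60 / 24 / 30 / 12) ++ "y", PySem.Int.toStr (a / 60 / 24 % 30) ++ "d"] hok
                · simp [h1, h2, h3, h4, hmon, hd, hh, hm]
                  have hok : ∀ p ∈ [PySem.Int.toStr (a / 60 / 24 / 30 / 12) ++ "y", PySem.Int.toStr (a / 60 / 24 % 30) ++ "d", PySem.Int.toStr (a % 60) ++ "m"],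
                      ∃ x c, p.toList = x ++ [c] ∧ PySem.Chars.isspace c = false := by
                    intro p hp
                    simp only [List.mem_cons, List.not_mem_nil, or_false] at hp
                    rcases hp with rfl | rfl | rfl
                    · exact ok_y _
                    · exact ok_d _
                    · exact ok_m _
                  exact keyStr' [PySem.Int.toStr (a / 60 / 24 / 30 / 12) ++ "y", PySem.Int.toStr (a / 60 / 24 % 30) ++ "d", PySem.Int.toStr (a % 60) ++ "m"] hok
              · by_cases hm : (60:Int) ∣ a
                · simp [h1, h2, h3, h4, hmon, hd, hh, hm]
                  have hok : ∀ p ∈ [PySem.Int.toStr (a / 60 / 24 / 30 / 12) ++ "y", PySem.Int.toStr (a / 60 / 24 % 30) ++ "d", PySem.Int.toStr (a / 60 % 24) ++ "h"],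
                      ∃ x c, p.toList = x ++ [c] ∧ PySem.Chars.isspace c = false := by
                    intro p hp
                    simp only [List.mem_cons, List.not_mem_nil, or_false] at hp
                    rcases hp with rfl | rfl | rfl
                    · exact ok_y _
                    · exact ok_d _
                    · exact ok_h _
                  exact keyStr' [PySem.Int.toStr (a / 60 / 24 / 30 / 12) ++ "y", PySem.Int.toStr (a / 60 / 24 % 30) ++ "d", PySem.Int.toStr (a / 60 % 24) ++ "h"] hok
                · simp [h1, h2, h3, h4, hmon, hd, hh, hm]
                  have hok : ∀ p ∈ [PySem.Int.toStr (a / 60 / 24 / 30 / 12) ++ "y", PySem.Int.toStr (a / 60 / 24 % 30) ++ "d", PySem.Int.toStr (a / 60 % 24) ++ "h", PySem.Int.toStr (a % 60) ++ "m"],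
                      ∃ x c, p.toList = x ++ [c] ∧ PySem.Chars.isspace c = false := by
                    intro p hp
                    simp only [List.mem_cons, List.not_mem_nil, or_false] at hp
                    rcases hp with rfl | rfl | rfl | rfl
                    · exact ok_y _
                    · exact ok_d _
                    · exact ok_h _
                    · exact ok_m _
                  exact keyStr' [PySem.Int.toStr (a / 60 / 24 / 30 / 12) ++ "y", PySem.Int.toStr (a / 60 / 24 % 30) ++ "d", PySem.Int.toStr (a / 60 % 24) ++ "h", PySem.Int.toStr (a % 60) ++ "m"] hok
          · by_cases hd : (30:Int) ∣ a / 60 / 24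
            · by_cases hh : (24:Int) ∣ a / 60
              · by_cases hm : (60:Int) ∣ a
                · simp [h1, h2, h3, h4, hmon, hd, hh, hm]
                  have hok : ∀ p ∈ [PySem.Int.toStr (a / 60 / 24 / 30 / 12) ++ "y", PySem.Int.toStr (a / 60 / 24 / 30 % 12) ++ "mon"],
                      ∃ x c, p.toList = x ++ [c] ∧ PySem.Chars.isspace c = false := by
                    intro p hp
                    simp only [List.mem_cons, List.not_mem_nil, or_false] at hp
                    rcases hp with rfl | rfl
                    · exact ok_y _
                    · exact ok_mon _
                  exact keyStr' [PySem.Int.toStr (a / 60 / 24 / 30 / 12) ++ "y", PySem.Int.toStr (a / 60 / 24 / 30 % 12) ++ "mon"] hok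
                · simp [h1, h2, h3, h4, hmon, hd, hh, hm]
                  have hok : ∀ p ∈ [PySem.Int.toStr (a / 60 / 24 / 30 / 12) ++ "y", PySem.Int.toStr (a / 60 / 24 / 30 % 12) ++ "mon", PySem.Int.toStr (a % 60) ++ "m"],
                      ∃ x c, p.toList = x ++ [c] ∧ PySem.Chars.isspace c = false := by
                    intro p hp
                    simp only [List.mem_cons, List.not_mem_nil, or_false] at hp
                    rcases hp with rfl | rfl | rfl
                    · exact ok_y _
                    · exact ok_mon _
                    · exact ok_m _
                  exact keyStr' [PySem.Int.toStr (a / 60 / 24 / 30 / 12) ++ "y", PySem.Int.toStr (a / 60 / 24 / 30 % 12) ++ "mon", PySem.Int.toStr (a % 60) ++ "m"] hok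
              · by_cases hm : (60:Int) ∣ a
                · simp [h1, h2, h3, h4, hmon, hd, hh, hm]
                  have hok : ∀ p ∈ [PySem.Int.toStr (a / 60 / 24 / 30 / 12) ++ "y", PySem.Int.toStr (a / 60 / 24 / 30 % 12) ++ "mon", PySem.Int.toStr (a / 60 % 24) ++ "h"],
                      ∃ x c, p.toList = x ++ [c] ∧ PySem.Chars.isspace c = false := by
                    intro p hp
                    simp only [List.mem_cons, List.not_mem_nil, or_false] at hp
                    rcases hp with rfl | rfl | rfl
                    · exact ok_y _
                    · exact ok_mon _
                    · exact ok_h _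
                  exact keyStr' [PySem.Int.toStr (a / 60 / 24 / 30 / 12) ++ "y", PySem.Int.toStr (a / 60 / 24 / 30 % 12) ++ "mon", PySem.Int.toStr (a / 60 % 24) ++ "h"] hok
                · simp [h1, h2, h3, h4, hmon, hd, hh, hm]
                  have hok : ∀ p ∈ [PySem.Int.toStr (a / 60 / 24 / 30 / 12) ++ "y", PySem.Int.toStr (a / 60 / 24 / 30 % 12) ++ "mon", PySem.Int.toStr (a / 60 % 24) ++ "h", PySem.Int.toStr (a % 60) ++ "m"],
                      ∃ x c, p.toList = x ++ [c] ∧ PySem.Chars.isspace c = false := by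
                    intro p hp
                    simp only [List.mem_cons, List.not_mem_nil, or_false] at hp
                    rcases hp with rfl | rfl | rfl | rfl
                    · exact ok_y _
                    · exact ok_mon _
                    · exact ok_h _
                    · exact ok_m _
                  exact keyStr' [PySem.Int.toStr (a / 60 / 24 / 30 / 12) ++ "y", PySem.Int.toStr (a / 60 / 24 / 30 % 12) ++ "mon", PySem.Int.toStr (a / 60 % 24) ++ "h", PySem.Int.toStr (a % 60) ++ "m"] hok
            · by_cases hh : (24:Int) ∣ a / 60
              · by_cases hm : (60:Int) ∣ a
                · simp [h1, h2, h3, h4, hmon, hd, hh, hm]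
                  have hok : ∀ p ∈ [PySem.Int.toStr (a / 60 / 24 / 30 / 12) ++ "y", PySem.Int.toStr (a / 60 / 24 / 30 % 12) ++ "mon", PySem.Int.toStr (a / 60 / 24 % 30) ++ "d"],
                      ∃ x c, p.toList = x ++ [c] ∧ PySem.Chars.isspace c = false := by
                    intro p hp
                    simp only [List.mem_cons, List.not_mem_nil, or_false] at hp
                    rcases hp with rfl | rfl | rfl
                    · exact ok_y _
                    · exact ok_mon _
                    · exact ok_d _
                  exact keyStr' [PySem.Int.toStr (a / 60 / 24 / 30 / 12) ++ "y", PySem.Int.toStr (a / 60 / 24 / 30 % 12) ++ "mon", PySem.Int.toStr (a / 60 / 24 % 30) ++ "d"] hok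
                · simp [h1, h2, h3, h4, hmon, hd, hh, hm]
                  have hok : ∀ p ∈ [PySem.Int.toStr (a / 60 / 24 / 30 / 12) ++ "y", PySem.Int.toStr (a / 60 / 24 / 30 % 12) ++ "mon", PySem.Int.toStr (a / 60 / 24 % 30) ++ "d", PySem.Int.toStr (a % 60) ++ "m"],
                      ∃ x c, p.toList = x ++ [c] ∧ PySem.Chars.isspace c = false := by
                    intro p hp
                    simp only [List.mem_cons, List.not_mem_nil, or_false] at hp
                    rcases hp with rfl | rfl | rfl | rfl
                    · exact ok_y _
                    · exact ok_mon _
                    · exact ok_d _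
                    · exact ok_m _
                  exact keyStr' [PySem.Int.toStr (a / 60 / 24 / 30 / 12) ++ "y", PySem.Int.toStr (a / 60 / 24 / 30 % 12) ++ "mon", PySem.Int.toStr (a / 60 / 24 % 30) ++ "d", PySem.Int.toStr (a % 60) ++ "m"] hok
              · by_cases hm : (60:Int) ∣ a
                · simp [h1, h2, h3, h4, hmon, hd, hh, hm]
                  have hok : ∀ p ∈ [PySem.Int.toStr (a / 60 / 24 / 30 / 12) ++ "y", PySem.Int.toStr (a / 60 / 24 / 30 % 12) ++ "mon", PySem.Int.toStr (a / 60 / 24 % 30) ++ "d", PySem.Int.toStr (a / 60 % 24) ++ "h"],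
                      ∃ x c, p.toList = x ++ [c] ∧ PySem.Chars.isspace c = false := by
                    intro p hp
                    simp only [List.mem_cons, List.not_mem_nil, or_false] at hp
                    rcases hp with rfl | rfl | rfl | rfl
                    · exact ok_y _
                    · exact ok_mon _
                    · exact ok_d _
                    · exact ok_h _
                  exact keyStr' [PySem.Int.toStr (a / 60 / 24 / 30 / 12) ++ "y", PySem.Int.toStr (a / 60 / 24 / 30 % 12) ++ "mon", PySem.Int.toStr (a / 60 / 24 % 30) ++ "d", PySem.Int.toStr (a / 60 % 24) ++ "h"] hok
                · simp [h1, h2, h3, h4, hmon, hd, hh, hm]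
                  have hok : ∀ p ∈ [PySem.Int.toStr (a / 60 / 24 / 30 / 12) ++ "y", PySem.Int.toStr (a / 60 / 24 / 30 % 12) ++ "mon", PySem.Int.toStr (a / 60 / 24 % 30) ++ "d", PySem.Int.toStr (a / 60 % 24) ++ "h", PySem.Int.toStr (a % 60) ++ "m"],
                      ∃ x c, p.toList = x ++ [c] ∧ PySem.Chars.isspace c = false := by
                    intro p hp
                    simp only [List.mem_cons, List.not_mem_nil, or_false] at hp
                    rcases hp with rfl | rfl | rfl | rfl | rfl
                    · exact ok_y _
                    · exact ok_mon _
                    · exact ok_d _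
                    · exact ok_h _
                    · exact ok_m _
                  exact keyStr' [PySem.Int.toStr (a / 60 / 24 / 30 / 12) ++ "y", PySem.Int.toStr (a / 60 / 24 / 30 % 12) ++ "mon", PySem.Int.toStr (a / 60 / 24 % 30) ++ "d", PySem.Int.toStr (a / 60 % 24) ++ "h", PySem.Int.toStr (a % 60) ++ "m"] hok

-- ===== VERDICT (by name: the statement is the Claim_ definition above) =====
theorem minutes_to_human_readable_spec : Claim_equal_minutes_to_human_readable := by
  unfold Claim_equal_minutes_to_human_readable
  intro minutes _
  unfold Spec_minutes_to_human_readable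
  exact (main_eq minutes).trans (alt_eq_chain minutes).symm
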